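-- pv_equiv track=rewrite | github.com/Arsen1302/Code-copy-detector | TestData/solutions/problem_782_1_1.py | solution_782_1_1
-- ===== SOURCE A (Python) =====
-- def solution_782_1_1(n: int) -> int:
--     # find number of prime indices
--     # ways to arrange prime indices
--     # is prime indices solution_782_1_3
--     # amount of non-prime indices is
--     # n - prime indices
--     # the solution_782_1_3 of non - prime indices
--     # times the solution_782_1_3 of prime indices
--     # is the amount of ways to arrange the
--     # prime numbers and i be valid
--     # use helper to find solution_782_1_3 of a number
--     # use helper to see if a number is prime
--     # time O(n ^ 2) space O(1)
--
--     def solution_782_1_2(num):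
--         if num <= 1:
--             return False
--         for i in range(2, num // 2 + 1):
--             if num % i == 0:
--                 return False
--         return True
--
--     def solution_782_1_3(num):
--         res = 1
--         for i in range(1, num + 1):
--             res *= i
--         return res
--
--     primes = 0
--     for num in range(1, n + 1):
--         if solution_782_1_2(num):
--             primes += 1
--     return int(solution_782_1_3(primes) * solution_782_1_3(n - primes) % (10**9 + 7))
-- ===== SOURCE B (Python) =====
-- def solution_782_1_1(n: int) -> int:
--     # sqrt-bounded trial division for the prime count, factorials taken mod p inside the loop
--     MOD = 10 ** 9 + 7
--
--     def is_prime(num):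
--         if num <= 1:
--             return False
--         i = 2
--         while i * i <= num:
--             if num % i == 0:
--                 return False
--             i += 1
--         return True
--
--     primes = sum(1 for num in range(2, n + 1) if is_prime(num))
--
--     def fact_mod(num):
--         res = 1
--         for i in range(1, num + 1):
--             res = res * i % MOD
--         return res
--
--     return fact_mod(primes) * fact_mod(n - primes) % MOD
-- ===== Notes on version B (the rewrite author's own statement) =====
-- stated objective: faster
-- what changed: Primality is tested by trial division only up to sqrt(num) instead of num//2, the prime count sums over range(2, n+1), and the two factorials are reduced mod 10^9+7 inside the loop instead of multiplying full big integers and taking one final mod.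
import Mathlib
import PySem

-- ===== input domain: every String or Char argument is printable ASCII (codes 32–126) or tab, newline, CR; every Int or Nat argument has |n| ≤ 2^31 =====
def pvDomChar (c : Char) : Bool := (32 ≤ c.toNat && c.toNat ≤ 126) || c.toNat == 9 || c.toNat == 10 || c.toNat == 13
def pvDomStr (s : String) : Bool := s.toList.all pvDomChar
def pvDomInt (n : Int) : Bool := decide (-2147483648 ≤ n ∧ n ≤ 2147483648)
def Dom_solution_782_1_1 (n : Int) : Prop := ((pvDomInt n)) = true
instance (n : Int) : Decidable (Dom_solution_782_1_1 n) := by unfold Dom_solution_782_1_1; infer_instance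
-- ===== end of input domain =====

-- B replaces A's half-bound trial division by sqrt-bound trial division and takes the
-- factorial product modulo 10^9+7 inside the loop (objective: faster, asymptotic).

-- ===== PORT A =====
-- helper solution_782_1_2: trial division over range(2, num // 2 + 1)
def pvIsPrimeA (num : Int) : Bool :=
  if num ≤ 1 then false
  else (PySem.List.pyRange 2 (PySem.Int.floordiv num 2 + 1) 1).all
    (fun i => !(PySem.Int.mod num i == 0))

-- helper solution_782_1_3: full (big-integer) factorial
def pvFactA (num : Int) : Int :=
  (PySem.List.pyRange 1 (num + 1) 1).foldl (fun res i => res * i) 1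

def solution_782_1_1 (n : Int) : Int :=
  let primes : Int :=
    (PySem.List.pyRange 1 (n + 1) 1).foldl
      (fun primes num => if pvIsPrimeA num then primes + 1 else primes) 0
  PySem.Int.mod (pvFactA primes * pvFactA (n - primes)) (10 ^ 9 + 7)

-- ===== PORT B =====
-- while i * i <= num: …; i += 1   (terminates: i ≤ num whenever i * i ≤ num)
def pvIsPrimeBAux (num i : Int) : Bool :=
  if h : i * i ≤ num then
    if PySem.Int.mod num i == 0 then false
    else pvIsPrimeBAux num (i + 1)
  else true
termination_by (num + 1 - i).toNat
decreasing_by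
  have h0 : (0 : Int) ≤ num := le_trans (mul_self_nonneg i) h
  have h1 : 2 * i - 1 ≤ num := by nlinarith [sq_nonneg (i - 1)]
  omega

def pvIsPrimeB (num : Int) : Bool :=
  if num ≤ 1 then false else pvIsPrimeBAux num 2

-- fact_mod: factorial reduced mod 10^9+7 at every step
def pvFactModB (num : Int) : Int :=
  (PySem.List.pyRange 1 (num + 1) 1).foldl
    (fun res i => PySem.Int.mod (res * i) (10 ^ 9 + 7)) 1

def solution_782_1_1_alt (n : Int) : Int :=
  let primes : Int :=
    (((PySem.List.pyRange 2 (n + 1) 1).filter pvIsPrimeB).map (fun _ => (1 : Int))).sum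
  PySem.Int.mod (pvFactModB primes * pvFactModB (n - primes)) (10 ^ 9 + 7)

-- ===== PRECONDITION & SPEC =====
def Spec_solution_782_1_1 (n : Int) (out : Int) : Prop := out = solution_782_1_1_alt n
instance (n : Int) (out : Int) : Decidable (Spec_solution_782_1_1 n out) := by unfold Spec_solution_782_1_1; infer_instance

-- ===== CLAIM (what is proved, stated in full; the proofs are below) =====
def Claim_equal_solution_782_1_1 : Prop := ∀ (n : Int), Dom_solution_782_1_1 n → Spec_solution_782_1_1 n (solution_782_1_1 n)

-- ===== LEMMAS AND PROOFS =====

-- A's primality test: no divisor d with 2 ≤ d ≤ num // 2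
lemma pvIsPrimeA_iff (num : Int) (h2 : 2 ≤ num) :
    pvIsPrimeA num = true ↔ ∀ d : Int, 2 ≤ d → d ≤ num / 2 → ¬ d ∣ num := by
  have hlt : ¬ num ≤ 1 := by omega
  rw [pvIsPrimeA, if_neg hlt, PySem.Int.floordiv_eq_ediv_of_pos (by norm_num)]
  simp only [List.all_eq_true, PySem.List.mem_pyRange_one, Bool.not_eq_eq_eq_not, Bool.not_true,
    beq_eq_false_iff_ne, ne_eq]
  constructor
  · intro h d hd1 hd2
    rw [← PySem.Int.mod_eq_zero_iff_dvd]
    exact h d ⟨hd1, by omega⟩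
  · intro h i hi
    rw [PySem.Int.mod_eq_zero_iff_dvd]
    exact h i hi.1 (by omega)

-- B's loop: no divisor d with i ≤ d and d * d ≤ num (for 2 ≤ i)
lemma pvIsPrimeBAux_iff (num i : Int) (hi : 2 ≤ i) :
    pvIsPrimeBAux num i = true ↔ ∀ d : Int, i ≤ d → d * d ≤ num → ¬ d ∣ num := by
  revert hi
  induction i using pvIsPrimeBAux.induct (num := num) with
  | case1 i h hdvd =>
    intro hi
    rw [pvIsPrimeBAux, dif_pos h, if_pos hdvd]
    have hd : i ∣ num := PySem.Int.mod_eq_zero_iff_dvd num i |>.mp (beq_iff_eq.mp hdvd)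
    simp only [Bool.false_eq_true, false_iff, not_forall]
    exact ⟨i, le_refl i, h, fun hc => hc hd⟩
  | case2 i h hdvd ih =>
    intro hi
    rw [pvIsPrimeBAux, dif_pos h, if_neg hdvd]
    rw [ih (by omega)]
    constructor
    · intro hall d hd1 hd2
      rcases eq_or_lt_of_le hd1 with heq | hlt
      · subst heq
        rw [← PySem.Int.mod_eq_zero_iff_dvd]
        simpa using hdvd
      · exact hall d (by omega) hd2
    · intro hall d hd1 hd2
      exact hall d (by omega) hd2
  | case3 i h =>
    intro hi
    rw [pvIsPrimeBAux, dif_neg h]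
    simp only [true_iff]
    intro d hd1 hd2 _
    have : i * i ≤ d * d := by nlinarith
    omega

-- the two divisor bounds are equivalent
lemma bounds_equiv (num : Int) (h2 : 2 ≤ num) :
    (∀ d : Int, 2 ≤ d → d ≤ num / 2 → ¬ d ∣ num) ↔
    (∀ d : Int, 2 ≤ d → d * d ≤ num → ¬ d ∣ num) := by
  constructor
  · intro h d hd1 hd2 hdvd
    refine h d hd1 ?_ hdvd
    rw [Int.le_ediv_iff_mul_le (by norm_num)]
    nlinarith
  · intro h e he1 he2 hedvd
    have h2e : e * 2 ≤ num := (Int.le_ediv_iff_mul_le (by norm_num)).mp he2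
    obtain ⟨k, hk⟩ := hedvd
    have he0 : 0 < e := by omega
    have hk2 : 2 ≤ k := by nlinarith
    by_cases hee : e * e ≤ num
    · exact h e he1 hee ⟨k, hk⟩
    · have hke : k < e := by nlinarith
      have hkk : k * k ≤ num := by nlinarith
      exact h k hk2 hkk ⟨e, by rw [hk]; ring⟩

lemma isPrime_eq (num : Int) : pvIsPrimeA num = pvIsPrimeB num := by
  by_cases h : num ≤ 1
  · rw [pvIsPrimeA, pvIsPrimeB, if_pos h, if_pos h]
  · rw [Bool.eq_iff_iff, pvIsPrimeA_iff num (by omega), pvIsPrimeB, if_neg h,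
      pvIsPrimeBAux_iff num 2 le_rfl]
    exact bounds_equiv num (by omega)

-- mod-at-every-step folding equals one mod at the end
lemma foldl_mod_mul (l : List Int) (a : Int) :
    l.foldl (fun res i => PySem.Int.mod (res * i) (10 ^ 9 + 7)) (PySem.Int.mod a (10 ^ 9 + 7)) =
    PySem.Int.mod (l.foldl (fun res i => res * i) a) (10 ^ 9 + 7) := by
  induction l generalizing a with
  | nil => rfl
  | cons x xs ih =>
    simp only [List.foldl_cons]
    rw [← ih (a * x)]
    congr 1
    rw [PySem.Int.mod_eq_emod_of_pos (by norm_num), PySem.Int.mod_eq_emod_of_pos (by norm_num),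
      PySem.Int.mod_eq_emod_of_pos (by norm_num)]
    conv_rhs => rw [Int.mul_emod]
    rw [Int.mul_emod (_ % _) x, Int.emod_emod_of_dvd _ dvd_rfl]

lemma factMod_eq (num : Int) :
    pvFactModB num = PySem.Int.mod (pvFactA num) (10 ^ 9 + 7) := by
  rw [pvFactModB, pvFactA]
  have h1 : (1 : Int) = PySem.Int.mod 1 (10 ^ 9 + 7) := by decide
  conv_lhs => rw [h1]
  exact foldl_mod_mul _ 1

-- both programs compute the same prime count
lemma primes_eq (n : Int) :
    (PySem.List.pyRange 1 (n + 1) 1).foldl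
      (fun primes num => if pvIsPrimeA num then primes + 1 else primes) 0 =
    (((PySem.List.pyRange 2 (n + 1) 1).filter pvIsPrimeB).map (fun _ => (1 : Int))).sum := by
  rw [PySem.List.foldl_count_if, PySem.List.sum_map_const_int, mul_one, zero_add,
    ← List.countP_eq_length_filter]
  have hcong : ∀ l : List Int, l.countP pvIsPrimeA = l.countP pvIsPrimeB :=
    fun l => List.countP_congr (fun x _ => by rw [isPrime_eq])
  rw [hcong]
  by_cases hn : 1 ≤ n
  · rw [PySem.List.pyRange_one_cons (by omega : (1:Int) < n + 1), List.countP_cons]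
    have : pvIsPrimeB 1 = false := rfl
    simp [this]
  · rw [PySem.List.pyRange_one_eq_nil (by omega : n + 1 ≤ 1),
      PySem.List.pyRange_one_eq_nil (by omega : n + 1 ≤ 2)]

-- ===== VERDICT (by name: the statement is the Claim_ definition above) =====
theorem solution_782_1_1_spec : Claim_equal_solution_782_1_1 := by
  unfold Claim_equal_solution_782_1_1 Spec_solution_782_1_1
  intro n _
  rw [solution_782_1_1, solution_782_1_1_alt]
  rw [← primes_eq, factMod_eq, factMod_eq]
  set p := (PySem.List.pyRange 1 (n + 1) 1).foldl
      (fun primes num => if pvIsPrimeA num then primes + 1 else primes) 0 with hp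
  rw [PySem.Int.mod_eq_emod_of_pos (by norm_num), PySem.Int.mod_eq_emod_of_pos (by norm_num),
    PySem.Int.mod_eq_emod_of_pos (by norm_num), PySem.Int.mod_eq_emod_of_pos (by norm_num)]
  rw [Int.mul_emod (_ % _), Int.emod_emod_of_dvd _ dvd_rfl, Int.emod_emod_of_dvd _ dvd_rfl,
    ← Int.mul_emod]
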